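-- pv_equiv track=rewrite | github.com/ccssyy/ML_Lab1_NaiveClassification | wineclassification.py | separateByClass
-- ===== SOURCE A (Python) =====
-- def separateByClass(dataset):
--     separated = {}
--     for i in range(len(dataset)):
--         vector = dataset[i]
--         if (vector[0] not in separated):
--             separated[vector[0]] = []
--         separated[vector[0]].append(vector)
--     return separated
-- ===== SOURCE B (Python) =====
-- def separateByClass(dataset):
--     keys = list(dict.fromkeys(v[0] for v in dataset))
--     return {k: [v for v in dataset if v[0] == k] for k in keys}
-- ===== Notes on version B (the rewrite author's own statement) =====
-- stated objective: simpler
-- what changed: B replaces A's single-scan dict bucketing (check-membership, seed empty list, append) by two declarative passes: collect the distinct class labels in first-occurrence order, then build the result as one per-label filter comprehension.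
import Mathlib
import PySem

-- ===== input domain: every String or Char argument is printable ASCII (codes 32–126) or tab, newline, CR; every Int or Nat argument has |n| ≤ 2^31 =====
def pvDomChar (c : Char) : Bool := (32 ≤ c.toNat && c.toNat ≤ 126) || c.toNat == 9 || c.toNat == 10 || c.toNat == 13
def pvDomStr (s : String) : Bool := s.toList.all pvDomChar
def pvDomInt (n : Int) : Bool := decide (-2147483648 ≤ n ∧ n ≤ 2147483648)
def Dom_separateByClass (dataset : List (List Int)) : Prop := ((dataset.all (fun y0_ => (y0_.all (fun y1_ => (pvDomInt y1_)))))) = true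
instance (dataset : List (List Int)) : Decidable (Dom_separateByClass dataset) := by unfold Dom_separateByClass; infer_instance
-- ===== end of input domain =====

-- B groups rows by distinct-labels-then-filter (two declarative passes) instead of A's single-scan
-- dict bucketing; objective: simpler. Equivalence of return values on rows that are all nonempty.


-- vector[0]; Pre_ guarantees the row is nonempty, so the default is never used inside Pre_
def pvKey (v : List Int) : Int := (PySem.List.pyGet? v 0).getD 0

-- ===== PORT A =====
def separateByClass (dataset : List (List Int)) : List (Int × List (List Int)) :=
  (dataset.foldl (fun separated vector =>
      let separated :=
        if separated.contains (pvKey vector) then separated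
        else separated.insert (pvKey vector) ([] : List (List Int))
      separated.modify (pvKey vector) [] (fun l => l ++ [vector]))
    PySem.Dict.empty).items

-- ===== PORT B =====
def separateByClass_alt (dataset : List (List Int)) : List (Int × List (List Int)) :=
  let keys := PySem.List.dedup (dataset.map pvKey)
  keys.map (fun k => (k, dataset.filter (fun v => pvKey v == k)))

-- ===== PRECONDITION & SPEC =====
-- A (and B) raise IndexError on a dataset containing an empty row (vector[0]); exactly those are excluded.
def Pre_separateByClass (dataset : List (List Int)) : Prop :=
  (dataset.all (fun v => !v.isEmpty)) = true
instance (dataset : List (List Int)) : Decidable (Pre_separateByClass dataset) := by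
  unfold Pre_separateByClass; infer_instance
def pvWitness_separateByClass : List (List Int) := [[1, 5], [0, 7], [1, 2]]
def Spec_separateByClass (dataset : List (List Int)) (out : List (Int × List (List Int))) : Prop := out = separateByClass_alt dataset
instance (dataset : List (List Int)) (out : List (Int × List (List Int))) : Decidable (Spec_separateByClass dataset out) := by unfold Spec_separateByClass; infer_instance

-- ===== CLAIM (what is proved, stated in full; the proofs are below) =====
def Claim_equal_separateByClass : Prop := ∀ (dataset : List (List Int)), Dom_separateByClass dataset → Pre_separateByClass dataset → Spec_separateByClass dataset (separateByClass dataset)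

-- ===== LEMMAS AND PROOFS =====

-- A's loop body (ensure key, then append) is exactly 'modify key [] (· ++ [vector])'
theorem pvStep_eq_modify (d : PySem.Dict Int (List (List Int))) (v : List Int) :
    (if d.contains (pvKey v) then d else d.insert (pvKey v) ([] : List (List Int))).modify
        (pvKey v) [] (fun l => l ++ [v])
      = d.modify (pvKey v) [] (fun l => l ++ [v]) := by
  cases h : d.contains (pvKey v) with
  | true => simp
  | false =>
    simp only [Bool.false_eq_true, if_false]
    simp [PySem.Dict.modify, PySem.Dict.getD_insert_self, PySem.Dict.insert_insert_self,
      PySem.Dict.getD_of_not_contains d ([] : List (List Int)) h]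

theorem separateByClass_spec : Claim_equal_separateByClass := by
  intro dataset _hDom _hPre
  unfold Spec_separateByClass separateByClass separateByClass_alt
  have hstep : dataset.foldl (fun separated vector =>
        let separated :=
          if separated.contains (pvKey vector) then separated
          else separated.insert (pvKey vector) ([] : List (List Int))
        separated.modify (pvKey vector) [] (fun l => l ++ [vector]))
      PySem.Dict.empty
      = (dataset.map (fun v => (pvKey v, v))).foldl
          (fun d p => d.modify p.1 [] (fun l => l ++ [p.2])) PySem.Dict.empty := by
    rw [List.foldl_map]
    exact PySem.List.foldl_congr_mem _ _ _ _ (fun d v _ => pvStep_eq_modify d v)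
  rw [hstep]
  set l := dataset.map (fun v => (pvKey v, v)) with hl
  set D := l.foldl (fun d p => d.modify p.1 [] (fun l => l ++ [p.2])) PySem.Dict.empty with hD
  have hkeys : D.keys = PySem.Set.ofList (dataset.map pvKey) := by
    rw [hD, hl, List.foldl_map]
    have := PySem.Dict.keys_foldl_modify_key (l := dataset) (key := pvKey)
      (d0 := ([] : List (List Int))) (f := fun _ v l => l ++ [v]) (d := PySem.Dict.empty)
    simpa [PySem.Dict.keys_empty, PySem.Set.empty] using this
  have hnd : D.keys.Nodup := by
    rw [hD, hl, List.foldl_map]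
    exact PySem.Dict.nodup_keys_foldl_modify_key dataset pvKey [] (fun _ v l => l ++ [v])
      PySem.Dict.empty (by simp)
  have hitems : D.items = D.keys.map (fun k => (k, D.getD k [])) :=
    PySem.Dict.items_eq_map_keys D hnd []
  have hget : ∀ k, D.getD k [] = dataset.filter (fun v => pvKey v == k) := by
    intro k
    rw [hD]
    rw [PySem.Dict.getD_foldl_modify_append]
    rw [hl, List.filter_map, List.map_map]
    simp [Function.comp_def]
  rw [hitems, hkeys]
  rw [← PySem.List.dedup_eq_ofList]
  exact List.map_congr_left (fun k _ => by rw [hget k])
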